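-- pv_equiv track=rewrite | github.com/kacricon/composing-programs | hog/hog.py | free_bacon
-- ===== SOURCE A (Python) =====
-- def free_bacon(opponent_score: int) -> int:
--     """Calculates turn score using the Free bacon rule.
--
--     This rule finds the largest digit in the opponent's
--     score and returns that digit + 1.
--
--     opponent_score:  The opponent's current score.
--     """
--     # These assert statements ensure that opponent_score is an int between 0 and 99.
--     assert isinstance(opponent_score, int), "opponent_score must be an integer."
--     assert opponent_score >= 0 and opponent_score < 100, "opponent_score must be valid."
--
--     # calculate score using free bacon rule
--     max_digit = 0
--     while opponent_score:
--         opponent_score, digit = opponent_score // 10, opponent_score % 10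
--         max_digit = max(max_digit, digit)
--     return max_digit + 1
-- ===== SOURCE B (Python) =====
-- def free_bacon(opponent_score: int) -> int:
--     """Calculates turn score using the Free bacon rule (string-digit version)."""
--     assert isinstance(opponent_score, int), "opponent_score must be an integer."
--     assert opponent_score >= 0 and opponent_score < 100, "opponent_score must be valid."
--     return max(int(ch) for ch in str(opponent_score)) + 1
-- ===== Notes on version B (the rewrite author's own statement) =====
-- stated objective: idiomatic
-- what changed: Replaces the //10 and %10 digit-peeling while loop with an explicit max accumulator by taking the maximum digit over the decimal string representation of the score.
import Mathlib
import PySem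

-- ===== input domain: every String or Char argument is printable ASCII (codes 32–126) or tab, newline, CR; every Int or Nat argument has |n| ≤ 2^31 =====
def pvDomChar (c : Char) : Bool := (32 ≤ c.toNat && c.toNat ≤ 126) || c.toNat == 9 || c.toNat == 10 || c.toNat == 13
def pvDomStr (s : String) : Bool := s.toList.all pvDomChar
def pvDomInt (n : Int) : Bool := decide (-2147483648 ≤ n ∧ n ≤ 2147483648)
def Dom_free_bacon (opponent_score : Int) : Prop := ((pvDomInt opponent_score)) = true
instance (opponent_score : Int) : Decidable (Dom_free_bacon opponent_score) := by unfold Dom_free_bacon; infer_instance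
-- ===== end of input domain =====

-- B computes the maximum digit over str(opponent_score) instead of A's //10 / %10 peeling loop (idiomatic).

-- ===== PORT A =====
-- A's while loop; the guard 'opponent_score ≠ 0' is written '0 < s' and a fuel counter of
-- s.toNat makes the recursion structural — inside Pre_ (0 ≤ s) both coincide with Python's loop,
-- since //10 strictly decreases a positive s and never exhausts the fuel.
def free_bacon_loop (fuel : Nat) (s max_digit : Int) : Int :=
  match fuel with
  | 0 => max_digit
  | fuel + 1 =>
    if 0 < s then
      free_bacon_loop fuel (PySem.Int.floordiv s 10) (max max_digit (PySem.Int.mod s 10))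
    else max_digit

def free_bacon (opponent_score : Int) : Int :=
  free_bacon_loop opponent_score.toNat opponent_score 0 + 1

-- ===== PORT B =====
-- 'int(ch)' on a one-character digit string, exact via PySem.Int.ofStr?; the getD 0 default is
-- unreachable inside Pre_ (str of a nonnegative int is all digits).
def free_bacon_alt (opponent_score : Int) : Int :=
  match (PySem.Int.toStr opponent_score).toList.map
      (fun c => (PySem.Int.ofStr? (String.ofList [c])).getD 0) with
  | [] => 0 + 1  -- unreachable: str(n) is never empty (Python max would raise on empty)
  | d :: ds => ds.foldl max d + 1

-- ===== PRECONDITION & SPEC =====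
-- Pre_ = exactly A's asserts: AssertionError outside 0 ≤ s < 100.
def Pre_free_bacon (opponent_score : Int) : Prop :=
  0 ≤ opponent_score ∧ opponent_score < 100
instance (opponent_score : Int) : Decidable (Pre_free_bacon opponent_score) := by
  unfold Pre_free_bacon; infer_instance
def pvWitness_free_bacon : Int := (42)
def Spec_free_bacon (opponent_score : Int) (out : Int) : Prop := out = free_bacon_alt opponent_score
instance (opponent_score : Int) (out : Int) : Decidable (Spec_free_bacon opponent_score out) := by unfold Spec_free_bacon; infer_instance

-- ===== CLAIM (what is proved, stated in full; the proofs are below) =====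
def Claim_equal_free_bacon : Prop := ∀ (opponent_score : Int), Dom_free_bacon opponent_score → Pre_free_bacon opponent_score → Spec_free_bacon opponent_score (free_bacon opponent_score)

-- ===== LEMMAS AND PROOFS =====
set_option maxRecDepth 4000 in
-- the 100 admitted inputs, checked by evaluation
theorem free_bacon_all_small :
    ∀ n ∈ List.range 100, free_bacon (n : Int) = free_bacon_alt (n : Int) := by
  decide

-- ===== VERDICT (by name: the statement is the Claim_ definition above) =====
theorem free_bacon_spec : Claim_equal_free_bacon := by
  intro s _ hpre
  unfold Spec_free_bacon
  obtain ⟨h0, h100⟩ := hpre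
  have hn : s = (s.toNat : Int) := by omega
  rw [hn]
  exact free_bacon_all_small s.toNat (List.mem_range.mpr (by omega))
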